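-- pv_equiv track=rewrite | github.com/Cyberkid2311/Hacktoberfest-2022-projects | A4_Q4.py | solve
-- ===== SOURCE A (Python) =====
-- def solve(A, B):
--     ans = []
--     n = len(A)
--     flag = 0
--     end = 0
--     for i in range(0,n):
--         if(A[i].startswith(B) and flag == 0):
--             ans.append(i)
--             flag = 1
--             end = i
--         elif(A[i].startswith(B)):
--             end = i
--     if(len(ans)==0):
--         ans = [-1,-1]
--     else:
--         ans.append(end)
--     return ans
-- ===== SOURCE B (Python) =====
-- def solve(A, B):
--     first = next((i for i in range(len(A)) if A[i].startswith(B)), -1)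
--     if first == -1:
--         return [-1, -1]
--     last = next((i for i in range(len(A) - 1, -1, -1) if A[i].startswith(B)), -1)
--     return [first, last]
-- ===== Notes on version B (the rewrite author's own statement) =====
-- stated objective: simpler
-- what changed: Replaces the single flag/end-tracking accumulation pass with two independent directed searches: a forward scan for the first matching index and a backward scan for the last.
import Mathlib
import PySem

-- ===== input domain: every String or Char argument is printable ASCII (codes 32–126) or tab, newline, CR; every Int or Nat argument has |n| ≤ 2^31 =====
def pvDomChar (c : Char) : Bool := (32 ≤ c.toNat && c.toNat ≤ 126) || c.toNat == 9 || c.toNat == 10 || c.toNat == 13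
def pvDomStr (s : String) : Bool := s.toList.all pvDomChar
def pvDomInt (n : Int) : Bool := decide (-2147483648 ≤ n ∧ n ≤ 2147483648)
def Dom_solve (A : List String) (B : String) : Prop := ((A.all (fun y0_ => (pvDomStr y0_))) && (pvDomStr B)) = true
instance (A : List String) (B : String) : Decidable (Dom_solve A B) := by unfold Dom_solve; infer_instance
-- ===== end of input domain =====

-- B replaces A's single flag/end-tracking pass with two independent directed scans
-- (forward for the first match, backward for the last); objective: simpler.


-- ===== PORT A =====
-- the loop 'for i in range(0,n)' with state (ans, flag, end)
def solveLoop (A : List String) (B : String) :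
    List Int → List Int × Int × Int → List Int × Int × Int
  | [], st => st
  | i :: rest, (ans, flag, e) =>
      if PySem.Str.startswith (PySem.List.pyGetD A i "") B ∧ flag = 0 then
        solveLoop A B rest (ans ++ [i], 1, i)
      else if PySem.Str.startswith (PySem.List.pyGetD A i "") B then
        solveLoop A B rest (ans, flag, i)
      else
        solveLoop A B rest (ans, flag, e)

def solve (A : List String) (B : String) : List Int :=
  let n : Int := A.length
  let st := solveLoop A B (PySem.List.pyRange 0 n 1) ([], 0, 0)
  if st.1.length = 0 then [-1, -1] else st.1 ++ [st.2.2]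

-- ===== PORT B =====
-- 'next((i for i in <indices> if A[i].startswith(B)), -1)'
def findFirst (A : List String) (B : String) : List Int → Int
  | [] => -1
  | i :: rest =>
      if PySem.Str.startswith (PySem.List.pyGetD A i "") B then i
      else findFirst A B rest

def solve_alt (A : List String) (B : String) : List Int :=
  let n : Int := A.length
  let first := findFirst A B (PySem.List.pyRange 0 n 1)
  if first = -1 then [-1, -1]
  else [first, findFirst A B (PySem.List.pyRange (n - 1) (-1) (-1))]

-- ===== PRECONDITION & SPEC =====
def Spec_solve (A : List String) (B : String) (out : List Int) : Prop := out = solve_alt A B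
instance (A : List String) (B : String) (out : List Int) : Decidable (Spec_solve A B out) := by unfold Spec_solve; infer_instance

-- ===== CLAIM (what is proved, stated in full; the proofs are below) =====
def Claim_equal_solve : Prop := ∀ (A : List String) (B : String), Dom_solve A B → Spec_solve A B (solve A B)

-- ===== LEMMAS AND PROOFS =====

-- the 'end' value A's loop tracks: last matching index in L, default d
def lastD (A : List String) (B : String) (L : List Int) (d : Int) : Int :=
  L.foldl (fun acc i => if PySem.Str.startswith (PySem.List.pyGetD A i "") B then i else acc) d

lemma lastD_cons (A : List String) (B : String) (i : Int) (rest : List Int) (d : Int) :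
    lastD A B (i :: rest) d
      = lastD A B rest (if PySem.Str.startswith (PySem.List.pyGetD A i "") B then i else d) := rfl

lemma lastD_append (A : List String) (B : String) (L : List Int) (i d : Int) :
    lastD A B (L ++ [i]) d
      = if PySem.Str.startswith (PySem.List.pyGetD A i "") B then i else lastD A B L d := by
  unfold lastD
  rw [List.foldl_append]
  rfl

lemma solveLoop_no_match (A : List String) (B : String) (L : List Int)
    (h : ∀ i ∈ L, ¬ PySem.Str.startswith (PySem.List.pyGetD A i "") B = true)
    (st : List Int × Int × Int) :
    solveLoop A B L st = st := by
  induction L generalizing st with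
  | nil => rfl
  | cons i rest ih =>
      obtain ⟨ans, flag, e⟩ := st
      have hi := h i (by simp)
      rw [solveLoop, if_neg (fun hc => hi hc.1), if_neg hi]
      exact ih (fun j hj => h j (by simp [hj])) _

lemma solveLoop_after (A : List String) (B : String) (L : List Int)
    (ans : List Int) (e : Int) :
    solveLoop A B L (ans, 1, e) = (ans, 1, lastD A B L e) := by
  induction L generalizing e with
  | nil => rfl
  | cons i rest ih =>
      rw [lastD_cons, solveLoop, if_neg (fun hc => one_ne_zero hc.2)]
      by_cases hp : PySem.Str.startswith (PySem.List.pyGetD A i "") B = true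
      · rw [if_pos hp, if_pos hp]; exact ih i
      · rw [if_neg hp, if_neg hp]; exact ih e

lemma solveLoop_char (A : List String) (B : String) (L : List Int)
    (h : ∃ i ∈ L, PySem.Str.startswith (PySem.List.pyGetD A i "") B = true) (d : Int) :
    solveLoop A B L ([], 0, 0) = ([findFirst A B L], 1, lastD A B L d) := by
  induction L with
  | nil => simp at h
  | cons i rest ih =>
      rw [solveLoop, findFirst, lastD_cons]
      by_cases hp : PySem.Str.startswith (PySem.List.pyGetD A i "") B = true
      · rw [if_pos ⟨hp, rfl⟩, if_pos hp, if_pos hp, solveLoop_after]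
        simp
      · have hrest : ∃ j ∈ rest, PySem.Str.startswith (PySem.List.pyGetD A j "") B = true := by
          obtain ⟨j, hj, hjp⟩ := h
          rcases List.mem_cons.mp hj with rfl | hj'
          · exact absurd hjp hp
          · exact ⟨j, hj', hjp⟩
        rw [if_neg (fun hc => hp hc.1), if_neg hp, if_neg hp, if_neg hp]
        exact ih hrest

lemma findFirst_no_match (A : List String) (B : String) (L : List Int)
    (h : ∀ i ∈ L, ¬ PySem.Str.startswith (PySem.List.pyGetD A i "") B = true) :
    findFirst A B L = -1 := by
  induction L with
  | nil => rfl
  | cons i rest ih =>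
      rw [findFirst, if_neg (h i (by simp))]
      exact ih (fun j hj => h j (by simp [hj]))

lemma findFirst_mem (A : List String) (B : String) (L : List Int)
    (h : ∃ i ∈ L, PySem.Str.startswith (PySem.List.pyGetD A i "") B = true) :
    findFirst A B L ∈ L := by
  induction L with
  | nil => simp at h
  | cons i rest ih =>
      rw [findFirst]
      by_cases hp : PySem.Str.startswith (PySem.List.pyGetD A i "") B = true
      · rw [if_pos hp]; simp
      · have hrest : ∃ j ∈ rest, PySem.Str.startswith (PySem.List.pyGetD A j "") B = true := by
          obtain ⟨j, hj, hjp⟩ := h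
          rcases List.mem_cons.mp hj with rfl | hj'
          · exact absurd hjp hp
          · exact ⟨j, hj', hjp⟩
        rw [if_neg hp]
        exact List.mem_cons_of_mem _ (ih hrest)

lemma findFirst_reverse (A : List String) (B : String) (L : List Int)
    (h : ∃ i ∈ L, PySem.Str.startswith (PySem.List.pyGetD A i "") B = true) (d : Int) :
    findFirst A B L.reverse = lastD A B L d := by
  induction L using List.reverseRecOn with
  | nil => simp at h
  | append_singleton M i ih =>
      rw [List.reverse_append, lastD_append, List.reverse_singleton, List.singleton_append,
        findFirst]
      by_cases hp : PySem.Str.startswith (PySem.List.pyGetD A i "") B = true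
      · rw [if_pos hp, if_pos hp]
      · have hM : ∃ j ∈ M, PySem.Str.startswith (PySem.List.pyGetD A j "") B = true := by
          obtain ⟨j, hj, hjp⟩ := h
          rcases List.mem_append.mp hj with hj' | hj'
          · exact ⟨j, hj', hjp⟩
          · simp at hj'; subst hj'; exact absurd hjp hp
        rw [if_neg hp, if_neg hp]
        exact ih hM

-- the backward range of B's second scan is the reverse of the forward one
lemma pyRange_down_eq_reverse (n : Nat) :
    PySem.List.pyRange ((n : Int) - 1) (-1) (-1) = (PySem.List.pyRange 0 (n : Int) 1).reverse := by
  cases n with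
  | zero => decide
  | succ m =>
      simp only [PySem.List.pyRange]
      have h1 : (-1 : Int) < ((m+1 : Nat) : Int) - 1 := by push_cast; omega
      have h2 : (0:Int) < ((m+1:Nat) : Int) := by push_cast; omega
      norm_num [h1, h2]
      rw [if_pos (by omega)]
      apply List.ext_getElem
      · simp
      · intro j hj1 hj2
        simp only [List.getElem_reverse, List.getElem_map, List.getElem_range,
          List.length_map, List.length_range] at hj1 hj2 ⊢
        omega

-- ===== VERDICT (by name: the statement is the Claim_ definition above) =====
theorem solve_spec : Claim_equal_solve := by
  intro A B _
  unfold Spec_solve solve solve_alt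
  dsimp only
  set L := PySem.List.pyRange 0 (A.length : Int) 1 with hL
  by_cases h : ∃ i ∈ L, PySem.Str.startswith (PySem.List.pyGetD A i "") B = true
  · have hf := findFirst_mem A B L h
    have hfge : (0:Int) ≤ findFirst A B L := (PySem.List.mem_pyRange_one.mp hf).1
    rw [solveLoop_char A B L h 0]
    simp only [List.length_cons, List.length_nil]
    rw [if_neg (by omega), if_neg (by omega)]
    rw [pyRange_down_eq_reverse, ← hL, findFirst_reverse A B L h 0]
    rfl
  · push Not at h
    rw [solveLoop_no_match A B L h, findFirst_no_match A B L h]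
    simp
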